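-- pv_equiv track=rewrite | github.com/AzkyAlfani/Pemograman-1 | PRAK604-2310817210026-MUHAMMADPUTRAAZKYALFANI.py | eve
-- ===== SOURCE A (Python) =====
-- def eve(code, message):
--     result = ''
--     star = 0
--     hashtag = 0
--
--     for i in range(len(code)):
--         if code[i] == ' ' and message[i] == ' ':
--             result += ' '
--         elif code[i] == message[i]:
--             result += '*'
--             star += 1
--         else:
--             result += '#'
--             hashtag += 1
--
--     return result, star, hashtag
-- ===== SOURCE B (Python) =====
-- def _mark(c, m):
--     return '#' if c != m else ' ' if c == ' ' else '*'
--
-- def eve(code, message):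
--     pairs = list(zip(code, message))
--     hashtag = sum(c != m for c, m in pairs)
--     blanks = sum(c == ' ' and m == ' ' for c, m in pairs)
--     star = len(pairs) - hashtag - blanks
--     result = ''.join(_mark(c, m) for c, m in pairs)
--     return result, star, hashtag
-- ===== Notes on version B (the rewrite author's own statement) =====
-- stated objective: alternative
-- what changed: Instead of an indexed loop threading three accumulators, B zips the strings into pairs, counts mismatches and double-spaces directly on the pairs, derives the star count arithmetically as length minus the other two, and renders the marker string in a separate pass with mismatch tested first.
import Mathlib
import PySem

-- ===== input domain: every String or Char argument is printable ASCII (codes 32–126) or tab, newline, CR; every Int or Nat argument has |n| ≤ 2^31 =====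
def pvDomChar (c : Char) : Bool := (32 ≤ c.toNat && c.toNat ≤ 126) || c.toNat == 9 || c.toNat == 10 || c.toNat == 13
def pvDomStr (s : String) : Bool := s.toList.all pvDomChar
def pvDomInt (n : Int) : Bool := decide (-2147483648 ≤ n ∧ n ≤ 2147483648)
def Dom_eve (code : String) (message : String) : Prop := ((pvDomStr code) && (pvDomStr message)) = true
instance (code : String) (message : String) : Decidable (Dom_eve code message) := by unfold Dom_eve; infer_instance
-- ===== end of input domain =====

-- B replaces A's indexed loop threading three accumulators by zipping the strings into
-- pairs, counting mismatches and double-spaces on the pairs, deriving the star count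
-- arithmetically as length minus the other two, and rendering the markers separately.

-- ===== PORT A =====
-- single loop over indices, threading (result, star, hashtag); getD default is never
-- reached under Pre_eve (Python raises IndexError exactly there)
def eve (code : String) (message : String) : String × Int × Int :=
  let cs := code.toList
  let ms := message.toList
  let acc := (List.range cs.length).foldl
    (fun (acc : List Char × Int × Int) i =>
      let c := cs.getD i ' '
      let m := ms.getD i ' '
      if c = ' ' ∧ m = ' ' then (acc.1 ++ [' '], acc.2.1, acc.2.2)
      else if c = m then (acc.1 ++ ['*'], acc.2.1 + 1, acc.2.2)
      else (acc.1 ++ ['#'], acc.2.1, acc.2.2 + 1))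
    ([], 0, 0)
  (String.ofList acc.1, acc.2.1, acc.2.2)

-- ===== PORT B =====
-- B's per-pair marker helper
def pvMarkB (p : Char × Char) : Char :=
  if p.1 != p.2 then '#' else if p.1 == ' ' then ' ' else '*'

-- zip into pairs; count mismatches and double-spaces; star by arithmetic complement;
-- marker string rendered in a separate pass testing mismatch first
def eve_alt (code : String) (message : String) : String × Int × Int :=
  let pairs := code.toList.zip message.toList
  let hashtag : Int := (pairs.countP (fun p => p.1 != p.2) : Nat)
  let blanks : Int := (pairs.countP (fun p => p.1 == ' ' && p.2 == ' ') : Nat)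
  let star : Int := (pairs.length : Int) - hashtag - blanks
  let rs := pairs.map pvMarkB
  (String.ofList rs, star, hashtag)

-- ===== PRECONDITION & SPEC =====
-- Pre_ excludes inputs where message is shorter than code, on which Python A raises IndexError.
def Pre_eve (code : String) (message : String) : Prop :=
  code.toList.length ≤ message.toList.length
instance (code : String) (message : String) : Decidable (Pre_eve code message) := by
  unfold Pre_eve; infer_instance
def pvWitness_eve : String × String := ("ab c", "ax c")

def Spec_eve (code : String) (message : String) (out : String × Int × Int) : Prop := out = eve_alt code message
instance (code : String) (message : String) (out : String × Int × Int) : Decidable (Spec_eve code message out) := by unfold Spec_eve; infer_instance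

-- ===== CLAIM (what is proved, stated in full; the proofs are below) =====
def Claim_equal_eve : Prop := ∀ (code : String) (message : String), Dom_eve code message → Pre_eve code message → Spec_eve code message (eve code message)

-- ===== LEMMAS AND PROOFS =====

-- the marker char A produces at index i
def pvMark (cs ms : List Char) (i : Nat) : Char :=
  let c := cs.getD i ' '
  let m := ms.getD i ' '
  if c = ' ' ∧ m = ' ' then ' '
  else if c = m then '*'
  else '#'

theorem pvStep_eq (cs ms : List Char) (i : Nat) (r : List Char) (s h : Int) :
    (if cs.getD i ' ' = ' ' ∧ ms.getD i ' ' = ' ' then (r ++ [' '], s, h)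
     else if cs.getD i ' ' = ms.getD i ' ' then (r ++ ['*'], s + 1, h)
     else (r ++ ['#'], s, h + 1))
    = (r ++ [pvMark cs ms i],
       s + (if pvMark cs ms i = '*' then 1 else 0),
       h + (if pvMark cs ms i = '#' then 1 else 0)) := by
  simp only [pvMark]
  split_ifs <;> simp_all

theorem eve_fold_inv (cs ms : List Char) (l : List Nat) (res : List Char) (st ht : Int) :
    l.foldl
      (fun (acc : List Char × Int × Int) i =>
        let c := cs.getD i ' '
        let m := ms.getD i ' '
        if c = ' ' ∧ m = ' ' then (acc.1 ++ [' '], acc.2.1, acc.2.2)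
        else if c = m then (acc.1 ++ ['*'], acc.2.1 + 1, acc.2.2)
        else (acc.1 ++ ['#'], acc.2.1, acc.2.2 + 1))
      (res, st, ht)
    = (res ++ l.map (pvMark cs ms),
       st + ((l.map (pvMark cs ms)).count '*' : Int),
       ht + ((l.map (pvMark cs ms)).count '#' : Int)) := by
  induction l generalizing res st ht with
  | nil => simp
  | cons i l ih =>
    simp only [List.foldl_cons, List.map_cons, List.count_cons]
    rw [pvStep_eq]
    rw [ih]
    refine Prod.ext ?_ (Prod.ext ?_ ?_) <;> simp <;> split_ifs <;> omega

-- per-index markers over range = per-pair markers over the zip (message long enough)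
theorem pvMap_range_eq_zip (cs ms : List Char) (h : cs.length ≤ ms.length) :
    (List.range cs.length).map (pvMark cs ms) = (cs.zip ms).map pvMarkB := by
  induction cs generalizing ms with
  | nil => simp
  | cons c cs ih =>
    cases ms with
    | nil => simp at h
    | cons m ms =>
      simp only [List.length_cons, List.range_succ_eq_map, List.map_cons, List.map_map,
        List.zip_cons_cons, List.cons.injEq]
      constructor
      · simp only [pvMark, pvMarkB, List.getD_cons_zero]
        split_ifs <;> simp_all
      · have := ih ms (Nat.le_of_succ_le_succ h)
        rw [← this]
        apply List.map_congr_left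
        intro i _
        simp [pvMark, Function.comp]

-- each pair contributes exactly one of '*', '#', ' '
theorem pvCount_partition (l : List (Char × Char)) :
    (l.map pvMarkB).count '*'
      + l.countP (fun p => p.1 != p.2)
      + l.countP (fun p => p.1 == ' ' && p.2 == ' ') = l.length := by
  induction l with
  | nil => simp
  | cons p l ih =>
    simp only [List.map_cons, List.count_cons, List.countP_cons, List.length_cons]
    have hp : pvMarkB p = '*' ∨ pvMarkB p = '#' ∨ pvMarkB p = ' ' := by
      simp only [pvMarkB]; split_ifs <;> simp
    simp only [pvMarkB] at *
    split_ifs at * <;> simp_all [bne_iff_ne] <;> omega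

theorem pvCount_hash (l : List (Char × Char)) :
    (l.map pvMarkB).count '#' = l.countP (fun p => p.1 != p.2) := by
  induction l with
  | nil => simp
  | cons p l ih =>
    simp only [List.map_cons, List.count_cons, List.countP_cons, ih]
    simp only [pvMarkB]
    split_ifs <;> simp_all

theorem eve_spec : Claim_equal_eve := by
  intro code message _ hpre
  unfold Spec_eve eve eve_alt
  simp only
  rw [eve_fold_inv, pvMap_range_eq_zip _ _ hpre]
  have hpart := pvCount_partition (code.toList.zip message.toList)
  have hlen : (code.toList.zip message.toList).length = code.toList.length := by
    rw [List.length_zip]; unfold Pre_eve at hpre; omega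
  refine Prod.ext (by simp) (Prod.ext ?_ ?_)
  · simp only [zero_add]; omega
  · simp [pvCount_hash]
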